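-- pv_equiv track=rewrite | github.com/RGTPdyn/RGTP | algorithms/blocks.py | get_first_drop_groups_inds
-- ===== SOURCE A (Python) =====
-- def get_first_drop_groups_inds(map_w, map_h, pattern_name):
--     if pattern_name == '1in2':
--         free_idx = []
--         anchors_idx = []
--         for row_ind in range(map_h):
--             row_offset = row_ind * map_h
--             row_inds = list(range(row_offset, row_offset + map_w))
--             even_inds = row_inds[::2]
--             odd_inds = row_inds[1::2]
--             if row_ind % 2 == 0:
--                 anchors_idx += even_inds
--                 free_idx += odd_inds
--             else:
--                 anchors_idx += odd_inds
--                 free_idx += even_inds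
--     elif pattern_name == '1in4':
--         free_idx = []
--         anchors_idx = []
--         for row_ind in range(map_h):
--             row_offset = row_ind * map_h
--             row_inds = list(range(row_offset, row_offset + map_w))
--             even_inds = row_inds[::2]
--             odd_inds = row_inds[1::2]
--             if row_ind % 2 == 0:
--                 anchors_idx += even_inds
--                 free_idx += odd_inds
--             else:
--                 free_idx += row_inds
--     elif pattern_name == '1in9':
--         free_idx = []
--         anchors_idx = []
--         for row_ind in range(map_h):
--             row_offset = row_ind * map_h
--             row_inds = list(range(row_offset, row_offset + map_w))
--             sample_inds = row_inds[::3]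
--             non_sample_inds = list(set(row_inds) - set (sample_inds))
--             if row_ind % 3 == 0:
--                 anchors_idx += sample_inds
--                 free_idx += non_sample_inds
--             else:
--                 free_idx += row_inds
--         anchors_idx.sort()
--         free_idx.sort()
--     else:
--         raise ValueError('Unexpected initial pattern name')
--     return free_idx, anchors_idx
-- ===== SOURCE B (Python) =====
-- def _is_anchor(pattern_name, r, c):
--     if pattern_name == '1in2':
--         return r % 2 == c % 2
--     if pattern_name == '1in4':
--         return r % 2 == 0 and c % 2 == 0
--     return r % 3 == 0 and c % 3 == 0
--
--
-- def get_first_drop_groups_inds(map_w, map_h, pattern_name):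
--     if pattern_name not in ('1in2', '1in4', '1in9'):
--         raise ValueError('Unexpected initial pattern name')
--     free_idx = []
--     anchors_idx = []
--     for r in range(map_h):
--         for c in range(map_w):
--             idx = r * map_h + c
--             if _is_anchor(pattern_name, r, c):
--                 anchors_idx.append(idx)
--             else:
--                 free_idx.append(idx)
--     if pattern_name == '1in9':
--         anchors_idx.sort()
--         free_idx.sort()
--     return free_idx, anchors_idx
-- ===== Notes on version B (the rewrite author's own statement) =====
-- stated objective: simpler
-- what changed: Replaces the three per-pattern loops with their strided slices and per-row set differences by one nested row/column loop that classifies each cell with a modular anchor rule; Pre_ excludes pattern names other than '1in2'/'1in4'/'1in9', on which A raises ValueError.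
import Mathlib
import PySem

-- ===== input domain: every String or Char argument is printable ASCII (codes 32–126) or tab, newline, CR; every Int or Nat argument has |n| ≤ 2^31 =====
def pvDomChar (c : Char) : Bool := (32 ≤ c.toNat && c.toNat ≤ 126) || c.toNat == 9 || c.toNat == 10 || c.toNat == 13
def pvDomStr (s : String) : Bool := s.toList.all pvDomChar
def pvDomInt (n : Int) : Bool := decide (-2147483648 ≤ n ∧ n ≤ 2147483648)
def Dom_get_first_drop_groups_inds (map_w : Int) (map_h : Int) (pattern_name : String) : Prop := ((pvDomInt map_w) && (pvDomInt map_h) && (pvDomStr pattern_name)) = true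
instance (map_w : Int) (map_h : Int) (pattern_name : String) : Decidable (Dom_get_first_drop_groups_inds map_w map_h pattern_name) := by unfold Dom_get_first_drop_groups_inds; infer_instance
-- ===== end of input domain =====

-- B replaces A's per-pattern strided slicing / per-row set differences by one nested
-- row/column loop classifying each cell with a modular anchor rule (objective: simpler).


-- ===== PORT A =====
-- literal transliteration of A; the final 'else' branch is Python's 'raise ValueError',
-- excluded by Pre_.  xs[::2] / xs[1::2] / xs[::3] are slice? with step 2/3 (never none,
-- hence .getD []); list(set(row_inds) - set(sample_inds)) is PySem.Set.diff of Set.ofList's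
-- (the return value does not depend on Python's set iteration order: it is sorted before return).
def get_first_drop_groups_inds (map_w : Int) (map_h : Int) (pattern_name : String) : List Int × List Int :=
  if pattern_name = "1in2" then
    (PySem.List.pyRange 0 map_h 1).foldl (fun (acc : List Int × List Int) row_ind =>
      let row_offset := row_ind * map_h
      let row_inds := PySem.List.pyRange row_offset (row_offset + map_w) 1
      let even_inds := (PySem.List.slice? row_inds none none 2).getD []
      let odd_inds := (PySem.List.slice? row_inds (some 1) none 2).getD []
      if PySem.Int.mod row_ind 2 = 0 then (acc.1 ++ odd_inds, acc.2 ++ even_inds)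
      else (acc.1 ++ even_inds, acc.2 ++ odd_inds)) ([], [])
  else if pattern_name = "1in4" then
    (PySem.List.pyRange 0 map_h 1).foldl (fun (acc : List Int × List Int) row_ind =>
      let row_offset := row_ind * map_h
      let row_inds := PySem.List.pyRange row_offset (row_offset + map_w) 1
      let even_inds := (PySem.List.slice? row_inds none none 2).getD []
      let odd_inds := (PySem.List.slice? row_inds (some 1) none 2).getD []
      if PySem.Int.mod row_ind 2 = 0 then (acc.1 ++ odd_inds, acc.2 ++ even_inds)
      else (acc.1 ++ row_inds, acc.2)) ([], [])
  else if pattern_name = "1in9" then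
    let fa := (PySem.List.pyRange 0 map_h 1).foldl (fun (acc : List Int × List Int) row_ind =>
      let row_offset := row_ind * map_h
      let row_inds := PySem.List.pyRange row_offset (row_offset + map_w) 1
      let sample_inds := (PySem.List.slice? row_inds none none 3).getD []
      let non_sample_inds := PySem.Set.diff (PySem.Set.ofList row_inds) (PySem.Set.ofList sample_inds)
      if PySem.Int.mod row_ind 3 = 0 then (acc.1 ++ non_sample_inds, acc.2 ++ sample_inds)
      else (acc.1 ++ row_inds, acc.2)) ([], [])
    (PySem.List.sorted fa.1 (fun x => x) false, PySem.List.sorted fa.2 (fun x => x) false)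
  else ([], [])  -- raise ValueError: excluded by Pre_

-- ===== PORT B =====
def pvIsAnchor (pattern_name : String) (r : Int) (c : Int) : Bool :=
  if pattern_name = "1in2" then PySem.Int.mod r 2 == PySem.Int.mod c 2
  else if pattern_name = "1in4" then PySem.Int.mod r 2 == 0 && PySem.Int.mod c 2 == 0
  else PySem.Int.mod r 3 == 0 && PySem.Int.mod c 3 == 0

-- transliteration of B; the 'else' branch is B's 'raise ValueError', excluded by Pre_.
def get_first_drop_groups_inds_alt (map_w : Int) (map_h : Int) (pattern_name : String) : List Int × List Int :=
  if pattern_name = "1in2" ∨ pattern_name = "1in4" ∨ pattern_name = "1in9" then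
    let fa := (PySem.List.pyRange 0 map_h 1).foldl (fun (acc : List Int × List Int) r =>
      (PySem.List.pyRange 0 map_w 1).foldl (fun (acc : List Int × List Int) c =>
        let idx := r * map_h + c
        if pvIsAnchor pattern_name r c then (acc.1, acc.2 ++ [idx])
        else (acc.1 ++ [idx], acc.2)) acc) ([], [])
    if pattern_name = "1in9" then
      (PySem.List.sorted fa.1 (fun x => x) false, PySem.List.sorted fa.2 (fun x => x) false)
    else fa
  else ([], [])  -- raise ValueError: excluded by Pre_

-- ===== PRECONDITION & SPEC =====
-- Pre_ excludes exactly the pattern names on which A raises ValueError.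
def Pre_get_first_drop_groups_inds (map_w : Int) (map_h : Int) (pattern_name : String) : Prop :=
  pattern_name = "1in2" ∨ pattern_name = "1in4" ∨ pattern_name = "1in9"
instance (map_w : Int) (map_h : Int) (pattern_name : String) : Decidable (Pre_get_first_drop_groups_inds map_w map_h pattern_name) := by unfold Pre_get_first_drop_groups_inds; infer_instance
def pvWitness_get_first_drop_groups_inds : Int × Int × String := (4, 3, "1in2")

def Spec_get_first_drop_groups_inds (map_w : Int) (map_h : Int) (pattern_name : String) (out : List Int × List Int) : Prop := out = get_first_drop_groups_inds_alt map_w map_h pattern_name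
instance (map_w : Int) (map_h : Int) (pattern_name : String) (out : List Int × List Int) : Decidable (Spec_get_first_drop_groups_inds map_w map_h pattern_name out) := by unfold Spec_get_first_drop_groups_inds; infer_instance

-- ===== CLAIM =====
def Claim_equal_get_first_drop_groups_inds : Prop := ∀ (map_w : Int) (map_h : Int) (pattern_name : String), Dom_get_first_drop_groups_inds map_w map_h pattern_name → Pre_get_first_drop_groups_inds map_w map_h pattern_name → Spec_get_first_drop_groups_inds map_w map_h pattern_name (get_first_drop_groups_inds map_w map_h pattern_name)

-- ===== LEMMAS AND PROOFS =====

-- two strictly increasing lists with the same members are equal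
theorem pv_asc_ext {l₁ l₂ : List Int} (h1 : List.Pairwise (· < ·) l₁)
    (h2 : List.Pairwise (· < ·) l₂) (hm : ∀ x, x ∈ l₁ ↔ x ∈ l₂) : l₁ = l₂ := by
  have n1 : l₁.Nodup := h1.imp (fun h => ne_of_lt h)
  have n2 : l₂.Nodup := h2.imp (fun h => ne_of_lt h)
  exact List.Perm.eq_of_pairwise (fun a b _ _ hab hba => absurd hba (lt_asymm hab)) h1 h2
    ((List.perm_ext_iff_of_nodup n1 n2).2 hm)

-- a positive-step pyRange is strictly increasing
theorem pv_pairwise_pyRange {a b st : Int} (hst : 0 < st) :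
    List.Pairwise (· < ·) (PySem.List.pyRange a b st) := by
  rw [PySem.List.pyRange_of_pos a b hst]
  refine List.Pairwise.map _ ?_ List.pairwise_lt_range
  intro k1 k2 hk
  have : (k1 : Int) < (k2 : Int) := by exact_mod_cast hk
  have := Int.mul_lt_mul_of_pos_left this hst
  omega

-- xs[s::st] on xs = pyRange a b 1 is pyRange (a+s) b st  (0 ≤ s, 0 < st)
theorem pv_slice?_pyRange (a b s st : Int) (hs : 0 ≤ s) (hst : 0 < st) :
    PySem.List.slice? (PySem.List.pyRange a b 1) (some s) none st
      = some (PySem.List.pyRange (a + s) b st) := by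
  have hst0 : st ≠ 0 := by omega
  have hstlt : ¬ st < 0 := by omega
  rw [PySem.List.slice?]
  simp only [if_neg hst0, PySem.List.sliceIndices, if_neg hstlt, if_pos hst,
    PySem.List.length_pyRange_one]
  have hslt : ¬ s < 0 := by omega
  simp only [if_neg hslt]
  rw [PySem.List.pyRange_of_pos (a + s) b hst]
  set len : Int := ((b - a).toNat : Int) with hlen
  have hlen0 : 0 ≤ len := by positivity
  by_cases hab : a < b
  · have hlenv : len = b - a := by rw [hlen]; omega
    by_cases hsl : s ≤ len
    · have hmin : min s len = s := min_eq_left hsl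
      rw [hmin]
      by_cases hse : s < len
      · rw [if_pos hse, if_pos (by omega : a + s < b)]
        have hcnt : ((len - s + st - 1) / st).toNat = ((b - (a + s) + st - 1) / st).toNat := by
          congr 1; congr 1; omega
        rw [hcnt]
        congr 1
        have : ∀ k ∈ List.range ((b - (a + s) + st - 1) / st).toNat,
            (PySem.List.pyRange a b 1)[(s + st * (k : Int)).toNat]?
              = some (a + s + st * (k : Int)) := by
          intro k hk
          rw [List.mem_range, Int.lt_toNat] at hk
          have hk1 : ((k : Int) + 1) * st ≤ b - (a + s) + st - 1 :=
            (Int.le_ediv_iff_mul_le hst).1 (by omega)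
          have hbound : s + st * (k : Int) < b - a := by nlinarith
          have hge : 0 ≤ s + st * (k : Int) := by positivity
          rw [PySem.List.getElem?_pyRange_one]
          rw [if_pos (by omega : (s + st * (k : Int)).toNat < (b - a).toNat)]
          congr 1
          omega
        rw [List.filterMap_congr (g := fun (k : Nat) => (some ∘ fun (k : Nat) => a + s + st * (k : Int)) k) this]
        rw [List.filterMap_eq_map]
      · rw [if_neg hse, if_neg (by omega : ¬ a + s < b)]
        simp
    · have hmin : min s len = len := min_eq_right (by omega)
      rw [hmin, if_neg (by omega : ¬ len < len), if_neg (by omega : ¬ a + s < b)]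
      simp
  · have hlenv : len = 0 := by rw [hlen]; omega
    rw [hlenv]
    have hmin : min s (0 : Int) = 0 := by omega
    rw [hmin, if_neg (by omega : ¬ (0:Int) < 0), if_neg (by omega : ¬ a + s < b)]
    simp

-- xs[::st] is xs[0::st]
theorem pv_slice?_none (a b st : Int) (hst : 0 < st) :
    PySem.List.slice? (PySem.List.pyRange a b 1) none none st
      = PySem.List.slice? (PySem.List.pyRange a b 1) (some 0) none st := by
  have hst0 : st ≠ 0 := by omega
  have hstlt : ¬ st < 0 := by omega
  simp only [PySem.List.slice?, if_neg hst0, PySem.List.sliceIndices, if_neg hstlt,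
    PySem.List.length_pyRange_one]
  simp

-- B's inner loop over the columns is a pair of filtered maps
theorem pv_pairfold (p : Int → Bool) (f : Int → Int) :
    ∀ (l : List Int) (acc : List Int × List Int),
    l.foldl (fun acc c => if p c then (acc.1, acc.2 ++ [f c]) else (acc.1 ++ [f c], acc.2)) acc
      = (acc.1 ++ (l.filter (fun c => !p c)).map f, acc.2 ++ (l.filter p).map f) := by
  intro l
  induction l with
  | nil => intro acc; simp
  | cons c t ih =>
    intro acc
    by_cases hc : p c
    · simp [List.foldl_cons, hc, ih]
    · simp [List.foldl_cons, hc, ih]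

-- classified columns, shifted by ro, form a strided range (st = 2 or 3)
theorem pv_filter_cols (w ro t st : Int) (q : Int → Bool) (hst : st = 2 ∨ st = 3)
    (ht : 0 ≤ t ∧ t < st)
    (hq : ∀ c, 0 ≤ c → c < w → (q c = true ↔ PySem.Int.mod c st = t)) :
    ((PySem.List.pyRange 0 w 1).filter q).map (fun c => ro + c)
      = PySem.List.pyRange (ro + t) (ro + w) st := by
  have hst0 : (0 : Int) < st := by omega
  refine pv_asc_ext ?_ (pv_pairwise_pyRange hst0) ?_
  · exact List.Pairwise.map _ (fun a b h => by omega)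
      (List.Pairwise.filter q (PySem.List.pairwise_lt_pyRange_one 0 w))
  · intro x
    rw [PySem.List.mem_pyRange_iff_of_pos hst0]
    simp only [List.mem_map, List.mem_filter, PySem.List.mem_pyRange_one]
    constructor
    · rintro ⟨c, ⟨⟨hc0, hcw⟩, hqc⟩, rfl⟩
      have := (hq c hc0 hcw).1 hqc
      rw [PySem.Int.mod_eq_emod_of_pos hst0] at this
      rcases hst with h | h <;> subst h <;> omega
    · rintro ⟨h1, h2, h3⟩
      refine ⟨x - ro, ⟨⟨by omega, by omega⟩, ?_⟩, by omega⟩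
      rw [hq (x - ro) (by omega) (by omega), PySem.Int.mod_eq_emod_of_pos hst0]
      rcases hst with h | h <;> subst h <;> omega

-- the unclassified row: shifted columns are the row range itself
theorem pv_map_cols (w ro : Int) :
    (PySem.List.pyRange 0 w 1).map (fun c => ro + c) = PySem.List.pyRange ro (ro + w) 1 := by
  rw [PySem.List.pyRange_one 0 w, PySem.List.pyRange_one ro (ro + w), List.map_map]
  have : w - 0 = ro + w - ro := by ring
  rw [this]
  refine List.map_congr_left ?_
  intro k _
  simp

-- 1in9: the per-row set difference equals the shifted non-multiple-of-3 columns
theorem pv_nonsample (w ro : Int) (q : Int → Bool)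
    (hq : ∀ c, 0 ≤ c → c < w → (q c = true ↔ ¬ PySem.Int.mod c 3 = 0)) :
    ((PySem.List.pyRange 0 w 1).filter q).map (fun c => ro + c)
      = (PySem.List.pyRange ro (ro + w) 1).filter
          (fun x => !((PySem.List.pyRange ro (ro + w) 3).contains x)) := by
  refine pv_asc_ext ?_ ?_ ?_
  · exact List.Pairwise.map _ (fun a b h => by omega)
      (List.Pairwise.filter q (PySem.List.pairwise_lt_pyRange_one 0 w))
  · exact List.Pairwise.filter _ (PySem.List.pairwise_lt_pyRange_one ro (ro + w))
  · intro x
    simp only [List.mem_map, List.mem_filter, PySem.List.mem_pyRange_one,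
      Bool.not_eq_eq_eq_not, Bool.not_true, List.contains_eq_mem, decide_eq_false_iff_not,
      PySem.List.mem_pyRange_iff_of_pos (by omega : (0:Int) < 3)]
    constructor
    · rintro ⟨c, ⟨⟨hc0, hcw⟩, hqc⟩, rfl⟩
      have := (hq c hc0 hcw).1 hqc
      rw [PySem.Int.mod_eq_emod_of_pos (by omega : (0:Int) < 3)] at this
      exact ⟨⟨by omega, by omega⟩, by omega⟩
    · rintro ⟨⟨h1, h2⟩, h3⟩
      refine ⟨x - ro, ⟨⟨by omega, by omega⟩, ?_⟩, by omega⟩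
      rw [hq (x - ro) (by omega) (by omega), PySem.Int.mod_eq_emod_of_pos (by omega : (0:Int) < 3)]
      omega

-- mod r 2 is 0 or 1
theorem pv_mod2 (r : Int) : PySem.Int.mod r 2 = 0 ∨ PySem.Int.mod r 2 = 1 := by
  have h1 := PySem.Int.mod_nonneg r (by omega : (0:Int) < 2)
  have h2 := PySem.Int.mod_lt r (by omega : (0:Int) < 2)
  omega

-- (0 == mod c 2) classifies the even columns, (!(0 == mod c 2)) the odd ones
theorem pv_q20 (c : Int) : ((0 : Int) == PySem.Int.mod c 2) = true ↔ PySem.Int.mod c 2 = 0 := by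
  rw [beq_iff_eq]; omega

theorem pv_q21 (c : Int) : (!((0 : Int) == PySem.Int.mod c 2)) = true ↔ PySem.Int.mod c 2 = 1 := by
  have h1 := PySem.Int.mod_nonneg c (by omega : (0:Int) < 2)
  have h2 := PySem.Int.mod_lt c (by omega : (0:Int) < 2)
  simp only [Bool.not_eq_eq_eq_not, Bool.not_true, beq_eq_false_iff_ne, ne_eq]
  omega

theorem pv_q20' (c : Int) : ((PySem.Int.mod c 2 : Int) == 0) = true ↔ PySem.Int.mod c 2 = 0 := by
  rw [beq_iff_eq]

theorem pv_q21' (c : Int) : (!((PySem.Int.mod c 2 : Int) == 0)) = true ↔ PySem.Int.mod c 2 = 1 := by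
  have h1 := PySem.Int.mod_nonneg c (by omega : (0:Int) < 2)
  have h2 := PySem.Int.mod_lt c (by omega : (0:Int) < 2)
  simp only [Bool.not_eq_eq_eq_not, Bool.not_true, beq_eq_false_iff_ne, ne_eq]
  omega

theorem pv_q10 (c : Int) : ((1 : Int) == PySem.Int.mod c 2) = true ↔ PySem.Int.mod c 2 = 1 := by
  rw [beq_iff_eq]; omega

theorem pv_q10' (c : Int) : (!((1 : Int) == PySem.Int.mod c 2)) = true ↔ PySem.Int.mod c 2 = 0 := by
  have h1 := PySem.Int.mod_nonneg c (by omega : (0:Int) < 2)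
  have h2 := PySem.Int.mod_lt c (by omega : (0:Int) < 2)
  simp only [Bool.not_eq_eq_eq_not, Bool.not_true, beq_eq_false_iff_ne, ne_eq]
  omega

theorem pv_q30 (c : Int) : ((PySem.Int.mod c 3 : Int) == 0) = true ↔ PySem.Int.mod c 3 = 0 := by
  rw [beq_iff_eq]

theorem pv_q30' (c : Int) : (!((PySem.Int.mod c 3 : Int) == 0)) = true ↔ ¬ PySem.Int.mod c 3 = 0 := by
  simp

-- ===== VERDICT =====
theorem get_first_drop_groups_inds_spec : Claim_equal_get_first_drop_groups_inds := by
  intro map_w map_h pattern_name _ hpre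
  unfold Spec_get_first_drop_groups_inds
  unfold get_first_drop_groups_inds get_first_drop_groups_inds_alt
  rcases hpre with h | h | h <;> subst h <;> simp only [String.reduceEq, reduceIte, or_true, or_false, if_true]
  · -- 1in2
    refine PySem.List.foldl_congr_mem _ _ _ _ ?_
    intro acc r _
    rw [pv_pairfold (fun c => pvIsAnchor "1in2" r c) (fun c => r * map_h + c)]
    rw [pv_slice?_none _ _ 2 (by omega), pv_slice?_pyRange _ _ 0 2 le_rfl (by omega),
      pv_slice?_pyRange _ _ 1 2 (by omega) (by omega)]
    simp only [Option.getD_some, add_zero, pvIsAnchor, String.reduceEq, reduceIte]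
    rcases pv_mod2 r with hmod | hmod <;> simp only [hmod, reduceIte]
    · rw [pv_filter_cols map_w (r * map_h) 1 2 (fun c => !((0:Int) == PySem.Int.mod c 2))
          (Or.inl rfl) (by omega) (fun c _ _ => pv_q21 c),
        pv_filter_cols map_w (r * map_h) 0 2 (fun c => ((0:Int) == PySem.Int.mod c 2))
          (Or.inl rfl) (by omega) (fun c _ _ => pv_q20 c)]
      simp only [add_zero]
    · rw [if_neg (show ¬ ((1:Int) = 0) by omega),
        pv_filter_cols map_w (r * map_h) 0 2 (fun c => !((1:Int) == PySem.Int.mod c 2))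
          (Or.inl rfl) (by omega) (fun c _ _ => pv_q10' c),
        pv_filter_cols map_w (r * map_h) 1 2 (fun c => ((1:Int) == PySem.Int.mod c 2))
          (Or.inl rfl) (by omega) (fun c _ _ => pv_q10 c)]
      simp only [add_zero]
  · -- 1in4
    refine PySem.List.foldl_congr_mem _ _ _ _ ?_
    intro acc r _
    rw [pv_pairfold (fun c => pvIsAnchor "1in4" r c) (fun c => r * map_h + c)]
    rw [pv_slice?_none _ _ 2 (by omega), pv_slice?_pyRange _ _ 0 2 le_rfl (by omega),
      pv_slice?_pyRange _ _ 1 2 (by omega) (by omega)]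
    simp only [Option.getD_some, add_zero, pvIsAnchor, String.reduceEq, reduceIte]
    rcases pv_mod2 r with hmod | hmod <;> simp only [hmod, reduceIte]
    · simp only [show ((0:Int) == 0) = true by decide, Bool.true_and]
      rw [pv_filter_cols map_w (r * map_h) 1 2 (fun c => !((PySem.Int.mod c 2 : Int) == 0))
          (Or.inl rfl) (by omega) (fun c _ _ => pv_q21' c),
        pv_filter_cols map_w (r * map_h) 0 2 (fun c => ((PySem.Int.mod c 2 : Int) == 0))
          (Or.inl rfl) (by omega) (fun c _ _ => pv_q20' c)]
      simp only [add_zero]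
    · rw [if_neg (show ¬ ((1:Int) = 0) by omega)]
      simp only [show ((1:Int) == 0) = false by decide, Bool.false_and, Bool.not_false,
        List.filter_false, List.filter_true, List.map_nil, List.append_nil]
      rw [pv_map_cols map_w (r * map_h)]
  · -- 1in9
    have hfold : (PySem.List.pyRange 0 map_h 1).foldl (fun (acc : List Int × List Int) row_ind =>
        if PySem.Int.mod row_ind 3 = 0 then
          (acc.1 ++ PySem.Set.diff
              (PySem.Set.ofList (PySem.List.pyRange (row_ind * map_h) (row_ind * map_h + map_w) 1))
              (PySem.Set.ofList ((PySem.List.slice?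
                (PySem.List.pyRange (row_ind * map_h) (row_ind * map_h + map_w) 1) none none 3).getD [])),
           acc.2 ++ (PySem.List.slice?
                (PySem.List.pyRange (row_ind * map_h) (row_ind * map_h + map_w) 1) none none 3).getD [])
        else (acc.1 ++ PySem.List.pyRange (row_ind * map_h) (row_ind * map_h + map_w) 1, acc.2)) ([], [])
      = (PySem.List.pyRange 0 map_h 1).foldl (fun (acc : List Int × List Int) r =>
        (PySem.List.pyRange 0 map_w 1).foldl (fun (acc : List Int × List Int) c =>
          if pvIsAnchor "1in9" r c then (acc.1, acc.2 ++ [r * map_h + c])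
          else (acc.1 ++ [r * map_h + c], acc.2)) acc) ([], []) := by
      refine PySem.List.foldl_congr_mem _ _ _ _ ?_
      intro acc r _
      rw [pv_pairfold (fun c => pvIsAnchor "1in9" r c) (fun c => r * map_h + c)]
      rw [pv_slice?_none _ _ 3 (by omega), pv_slice?_pyRange _ _ 0 3 le_rfl (by omega)]
      simp only [Option.getD_some, add_zero, pvIsAnchor, String.reduceEq, reduceIte]
      have hnr : (PySem.List.pyRange (r * map_h) (r * map_h + map_w) 1).Nodup :=
        PySem.List.nodup_pyRange_one _ _
      have hns : (PySem.List.pyRange (r * map_h) (r * map_h + map_w) 3).Nodup :=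
        (pv_pairwise_pyRange (by omega : (0:Int) < 3)).imp (fun h => ne_of_lt h)
      rw [PySem.Set.ofList_eq_self_of_nodup _ hnr, PySem.Set.ofList_eq_self_of_nodup _ hns]
      by_cases hmod : PySem.Int.mod r 3 = 0
      · rw [if_pos hmod]
        simp only [hmod, show ((0:Int) == 0) = true by decide, Bool.true_and, PySem.Set.diff, PySem.Set.contains_eq_listContains]
        rw [pv_nonsample map_w (r * map_h) (fun c => !((PySem.Int.mod c 3 : Int) == 0))
            (fun c _ _ => pv_q30' c),
          pv_filter_cols map_w (r * map_h) 0 3 (fun c => ((PySem.Int.mod c 3 : Int) == 0))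
            (Or.inr rfl) (by omega) (fun c _ _ => pv_q30 c)]
        simp only [add_zero]
      · rw [if_neg hmod]
        have hb : ((PySem.Int.mod r 3 : Int) == 0) = false := by
          simp only [beq_eq_false_iff_ne, ne_eq]; exact hmod
        simp only [hb, Bool.false_and, Bool.not_false, List.filter_false,
          List.filter_true, List.map_nil, List.append_nil]
        rw [pv_map_cols map_w (r * map_h)]
    rw [hfold]
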